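-- pv_equiv track=rewrite | github.com/V1ncendzo/Auto_test_linux_Command | build_amides_events_from_report.py | parse_sha256
-- ===== SOURCE A (Python) =====
-- from typing import Dict, List, Optional, Tuple
--
-- def parse_sha256(m: Dict[str, str]) -> Optional[str]:
--     sha = m.get("SHA256")
--     if isinstance(sha, str) and sha.strip():
--         return sha.strip().lower()
--
--     hashes = m.get("Hashes")
--     if isinstance(hashes, str):
--         for part in hashes.split(","):
--             part = part.strip()
--             if part.upper().startswith("SHA256="):
--                 return part.split("=", 1)[1].strip().lower()
--     return None
-- ===== SOURCE B (Python) =====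
-- def parse_sha256(m):
--     sha = m.get("SHA256")
--     if isinstance(sha, str) and sha.strip():
--         return sha.strip().lower()
--
--     table = {}
--     hashes = m.get("Hashes")
--     if isinstance(hashes, str):
--         for part in hashes.split(","):
--             halves = part.strip().split("=", 1)
--             if len(halves) == 2:
--                 key = halves[0].upper()
--                 if key not in table:
--                     table[key] = halves[1]
--     val = table.get("SHA256")
--     if val is None:
--         return None
--     return val.strip().lower()
-- ===== Notes on version B (the rewrite author's own statement) =====
-- stated objective: idiomatic
-- what changed: The fallback scan-with-early-return over the Hashes parts is replaced by parsing the Hashes string once into a first-occurrence key->value dictionary (split each part on the first '=', uppercase the key) and then looking up 'SHA256'.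
import Mathlib
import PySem

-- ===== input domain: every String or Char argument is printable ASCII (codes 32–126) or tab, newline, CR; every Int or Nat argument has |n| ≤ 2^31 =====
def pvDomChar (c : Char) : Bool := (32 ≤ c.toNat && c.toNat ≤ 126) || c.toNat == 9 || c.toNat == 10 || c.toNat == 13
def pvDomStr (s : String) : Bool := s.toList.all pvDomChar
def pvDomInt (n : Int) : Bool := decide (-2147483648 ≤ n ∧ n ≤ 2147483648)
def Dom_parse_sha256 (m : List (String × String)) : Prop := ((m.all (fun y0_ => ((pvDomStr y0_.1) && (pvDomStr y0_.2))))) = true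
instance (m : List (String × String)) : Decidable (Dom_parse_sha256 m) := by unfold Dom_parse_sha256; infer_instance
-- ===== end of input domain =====

-- B replaces A's scan-with-early-return over the Hashes parts by building a first-occurrence
-- key→value index once and then looking up "SHA256" (objective: idiomatic; same cost).

-- m.get(k): first match in the association list (Python dict lookup)
def pvGet (m : List (String × String)) (k : String) : Option String :=
  (m.find? (fun p => p.1 == k)).map (·.2)

-- ===== PORT A =====
-- the for-loop over hashes.split(","): return at the first part whose stripped upper form starts with "SHA256="
def aScan : List String → Option String
  | [] => none
  | p :: rest =>
    let part := PySem.Str.strip p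
    if PySem.Str.startswith (PySem.Str.upper part) "SHA256=" then
      -- part.split("=", 1)[1].strip().lower(); the "=" is guaranteed by the test, so the defaults are unreachable
      some (PySem.Str.lower (PySem.Str.strip ((PySem.List.pyGet? ((PySem.Str.splitMax? part "=" 1).getD []) 1).getD "")))
    else aScan rest

def aFallback (m : List (String × String)) : Option String :=
  match pvGet m "Hashes" with
  | some h => aScan ((PySem.Str.split? h ",").getD [])   -- sep "," nonempty, split? is some
  | none => none

def parse_sha256 (m : List (String × String)) : Option String :=
  match pvGet m "SHA256" with
  | some sha =>
    if PySem.Str.strip sha ≠ "" then some (PySem.Str.lower (PySem.Str.strip sha))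
    else aFallback m
  | none => aFallback m

-- ===== PORT B =====
-- one loop step: split the stripped part on the first "=", record first occurrence of each (uppercased) key
def bStep (tbl : PySem.Dict String String) (part : String) : PySem.Dict String String :=
  let halves := (PySem.Str.splitMax? (PySem.Str.strip part) "=" 1).getD []
  if halves.length == 2 then
    let key := PySem.Str.upper ((PySem.List.pyGet? halves 0).getD "")
    if tbl.contains key then tbl else tbl.insert key ((PySem.List.pyGet? halves 1).getD "")
  else tbl

def bFallback (m : List (String × String)) : Option String :=
  let tbl : PySem.Dict String String :=
    match pvGet m "Hashes" with
    | some h => ((PySem.Str.split? h ",").getD []).foldl bStep PySem.Dict.empty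
    | none => PySem.Dict.empty
  match tbl.get? "SHA256" with
  | some v => some (PySem.Str.lower (PySem.Str.strip v))
  | none => none

def parse_sha256_alt (m : List (String × String)) : Option String :=
  match pvGet m "SHA256" with
  | some sha =>
    if PySem.Str.strip sha ≠ "" then some (PySem.Str.lower (PySem.Str.strip sha))
    else bFallback m
  | none => bFallback m

-- ===== PRECONDITION & SPEC =====
def Spec_parse_sha256 (m : List (String × String)) (out : Option String) : Prop := out = parse_sha256_alt m
instance (m : List (String × String)) (out : Option String) : Decidable (Spec_parse_sha256 m out) := by unfold Spec_parse_sha256; infer_instance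

-- ===== CLAIM (what is proved, stated in full; the proofs are below) =====
def Claim_equal_parse_sha256 : Prop := ∀ (m : List (String × String)), Dom_parse_sha256 m → Spec_parse_sha256 m (parse_sha256 m)

-- ===== LEMMAS AND PROOFS =====

theorem go_zero (fuel : Nat) (hf : 1 ≤ fuel) (l cur : List Char) (acc : List (List Char)) :
    PySem.Chars.splitOnMax.go ['='] fuel 0 l cur acc = ((cur.reverse ++ l) :: acc).reverse := by
  match fuel, hf with
  | Nat.succ f, _ =>
    cases l with
    | nil => simp [PySem.Chars.splitOnMax.go]
    | cons c rest => simp [PySem.Chars.splitOnMax.go]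

theorem go_one (l : List Char) : ∀ (fuel : Nat), l.length + 1 ≤ fuel → ∀ (cur : List Char) (acc : List (List Char)),
    PySem.Chars.splitOnMax.go ['='] fuel 1 l cur acc =
      if '=' ∈ l then
        acc.reverse ++ [cur.reverse ++ l.takeWhile (· ≠ '='), (l.dropWhile (· ≠ '=')).tail]
      else acc.reverse ++ [cur.reverse ++ l] := by
  induction l with
  | nil =>
    intro fuel hf cur acc
    match fuel, hf with
    | Nat.succ f, _ => simp [PySem.Chars.splitOnMax.go]
  | cons c rest ih =>
    intro fuel hf cur acc
    match fuel, hf with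
    | Nat.succ f, hf =>
      by_cases hc : c = '='
      · subst hc
        have h1 : (1:Nat) ≤ f := by simp at hf; omega
        simp only [PySem.Chars.splitOnMax.go]
        rw [if_neg (by omega)]
        rw [if_pos (by simp [List.isPrefixOf])]
        rw [go_zero f h1]
        simp [List.takeWhile, List.dropWhile]
      · have hpre : ['='].isPrefixOf (c :: rest) = false := by
          simp [List.isPrefixOf]; exact fun h => hc h.symm
        simp only [PySem.Chars.splitOnMax.go]
        rw [if_neg (by omega), hpre]
        simp only [Bool.false_eq_true, if_false]
        rw [ih f (by simpa using Nat.le_of_succ_le_succ hf)]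
        by_cases hm : '=' ∈ rest
        · rw [if_pos hm, if_pos (by simp [hm])]
          rw [List.takeWhile_cons_of_pos (by simp [hc]), List.dropWhile_cons_of_pos (by simp [hc])]
          simp
        · rw [if_neg hm, if_neg (by simp [hm]; exact fun h => hc h.symm)]
          simp

theorem splitOnMax_one (l : List Char) :
    PySem.Chars.splitOnMax l ['='] 1 =
      if '=' ∈ l then [l.takeWhile (· ≠ '='), (l.dropWhile (· ≠ '=')).tail] else [l] := by
  unfold PySem.Chars.splitOnMax
  rw [if_neg (by omega)]
  have h1 : (1:Int).toNat = 1 := rfl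
  rw [h1, go_one l (l.length + 1) (by simp) [] []]
  split_ifs <;> simp

theorem toNat_ofNat' (n : Nat) (h : n < 55296) : (Char.ofNat n).toNat = n := by
  unfold Char.ofNat
  split
  · simp [Char.ofNatAux, Char.toNat]
  · next hnot =>
    exfalso
    exact hnot (Or.inl h)

theorem upperChar_eq_eq (c : Char) : PySem.Chars.upperChar c = '=' ↔ c = '=' := by
  unfold PySem.Chars.upperChar PySem.Chars.islower
  split_ifs with h
  · constructor
    · intro he
      exfalso
      simp only [Bool.and_eq_true, decide_eq_true_eq] at h
      have h1 : 97 ≤ c.toNat ∧ c.toNat ≤ 122 := by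
        obtain ⟨ha, hb⟩ := h
        rw [Char.le_def] at ha hb
        exact ⟨ha, hb⟩
      have := congrArg Char.toNat he
      rw [toNat_ofNat' _ (by omega)] at this
      have h61 : ('=' : Char).toNat = 61 := rfl
      omega
    · intro he; subst he; simp at h
  · simp

theorem mem_upper (l : List Char) : '=' ∈ PySem.Chars.upper l ↔ '=' ∈ l := by
  unfold PySem.Chars.upper
  simp only [List.mem_map]
  constructor
  · rintro ⟨c, hc, he⟩; rwa [(upperChar_eq_eq c).1 he] at hc
  · intro h; exact ⟨'=', h, by rw [upperChar_eq_eq]⟩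

theorem ofList_inj (a b : List Char) : (String.ofList a = String.ofList b) ↔ a = b := by
  constructor
  · intro h; have := congrArg String.toList h; simpa using this
  · intro h; rw [h]

theorem takeWhile_all (tw : List Char) (hne : '=' ∉ tw) :
    List.takeWhile (fun x => !decide (x = '=')) tw = tw := by
  induction tw with
  | nil => rfl
  | cons c r ih =>
    simp only [List.mem_cons, not_or] at hne
    rw [List.takeWhile_cons_of_pos (by simp [Ne.symm, hne.1])]
    rw [ih hne.2]

theorem prefix_char (tw v : List Char) (hne : '=' ∉ PySem.Chars.upper tw) :
    ("SHA256=".toList.isPrefixOf (PySem.Chars.upper tw ++ '=' :: v))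
      = decide (PySem.Chars.upper tw = "SHA256".toList) := by
  by_cases h : PySem.Chars.upper tw = "SHA256".toList
  · rw [decide_eq_true h]
    rw [List.isPrefixOf_iff_prefix]
    exact ⟨v, by rw [h]; rfl⟩
  · rw [decide_eq_false h]
    by_contra hb
    rw [Bool.not_eq_false, List.isPrefixOf_iff_prefix] at hb
    obtain ⟨t, ht⟩ := hb
    apply h
    have := congrArg (List.takeWhile (fun x => !decide (x = '='))) ht.symm
    rw [List.takeWhile_append, if_pos (by rw [takeWhile_all _ hne])] at this
    rw [List.takeWhile_cons_of_neg (by simp)] at this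
    have hp : "SHA256=".toList ++ t = "SHA256".toList ++ '=' :: t := rfl
    rw [hp, List.takeWhile_append, if_pos (by rw [takeWhile_all]; decide)] at this
    rw [List.takeWhile_cons_of_neg (by simp)] at this
    simpa using this

theorem dropWhile_head_false (p : Char → Bool) (l : List Char) : ∀ t a, List.dropWhile p l = a :: t → p a = false := by
  induction l with
  | nil => intro t a h; simp at h
  | cons c r ih =>
    intro t a h
    by_cases hc : p c
    · rw [List.dropWhile_cons_of_pos hc] at h; exact ih t a h
    · rw [List.dropWhile_cons_of_neg hc] at h
      cases h
      simpa using hc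

theorem cond_eq (s : String) :
    PySem.Str.startswith (PySem.Str.upper s) "SHA256="
      = (((PySem.Str.splitMax? s "=" 1).getD []).length == 2 &&
          (PySem.Str.upper ((PySem.List.pyGet? ((PySem.Str.splitMax? s "=" 1).getD []) 0).getD "") == "SHA256")) := by
  have hsp : PySem.Str.splitMax? s "=" 1
      = some ((PySem.Chars.splitOnMax s.toList ['='] 1).map String.ofList) := by
    simp [PySem.Str.splitMax?, PySem.Chars.splitMax?]
  rw [hsp]
  simp only [Option.getD_some]
  rw [splitOnMax_one]
  have hlhs : PySem.Str.startswith (PySem.Str.upper s) "SHA256="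
      = "SHA256=".toList.isPrefixOf (PySem.Chars.upper s.toList) := by
    simp [PySem.Str.startswith, PySem.Str.upper, PySem.Chars.startswith]
  rw [hlhs]
  by_cases hm : '=' ∈ s.toList
  · rw [if_pos hm]
    set tw := s.toList.takeWhile (· ≠ '=') with htw
    set dw := s.toList.dropWhile (· ≠ '=') with hdw
    have hdne : dw ≠ [] := by
      intro h0
      rw [hdw, List.dropWhile_eq_nil_iff] at h0
      have := h0 '=' hm
      simp at this
    obtain ⟨a, t, hat⟩ := List.exists_cons_of_ne_nil hdne
    have hhead : a = '=' := by
      have := dropWhile_head_false (fun x => decide (x ≠ '=')) s.toList t a (by rw [← hdw]; exact hat)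
      simpa using this
    have hdc : dw = '=' :: dw.tail := by
      rw [hat, hhead]
      rfl
    have hl : s.toList = tw ++ '=' :: dw.tail := by
      conv_lhs => rw [← List.takeWhile_append_dropWhile (p := (· ≠ '=')) (l := s.toList)]
      rw [← htw, ← hdw]
      rw [← hdc]
    have hne : '=' ∉ PySem.Chars.upper tw := by
      rw [mem_upper]
      intro hx
      have := List.mem_takeWhile_imp (htw ▸ hx)
      simp at this
    have hup : PySem.Chars.upper s.toList
        = PySem.Chars.upper tw ++ '=' :: PySem.Chars.upper dw.tail := by
      rw [hl]
      simp [PySem.Chars.upper]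
      rfl
    rw [hup, prefix_char _ _ hne]
    have hg : PySem.List.pyGet? [String.ofList tw, String.ofList dw.tail] (0 : Int)
        = some (String.ofList tw) := by
      simp [PySem.List.pyGet?, PySem.List.pyIdx?]
    simp only [List.map_cons, List.map_nil, hg, Option.getD_some, List.length_cons,
      List.length_nil]
    have hlen : ((0 + 1 + 1 : Nat) == 2) = true := by decide
    rw [hlen, Bool.true_and]
    have hbeq : (PySem.Str.upper (String.ofList tw) == "SHA256")
        = decide (PySem.Chars.upper tw = "SHA256".toList) := by
      have h1 : PySem.Str.upper (String.ofList tw)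
          = String.ofList (PySem.Chars.upper tw) := by
        simp [PySem.Str.upper]
      rw [h1]
      have h2 : ("SHA256" : String) = String.ofList "SHA256".toList := rfl
      rw [h2]
      show decide (String.ofList (PySem.Chars.upper tw) = String.ofList "SHA256".toList) = _
      exact decide_eq_decide.mpr (ofList_inj _ _)
    rw [hbeq]
  · rw [if_neg hm]
    simp only [List.map_cons, List.map_nil, List.length_cons, List.length_nil]
    have hr : ((0 + 1 : Nat) == 2) = false := by decide
    rw [hr, Bool.false_and]
    by_contra hb
    rw [Bool.not_eq_false, List.isPrefixOf_iff_prefix] at hb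
    have : '=' ∈ PySem.Chars.upper s.toList := hb.subset (by decide)
    rw [mem_upper] at this
    exact hm this

-- the raw value B's table stores for the first matching part
def rawScan : List String → Option String
  | [] => none
  | p :: rest =>
    let halves := (PySem.Str.splitMax? (PySem.Str.strip p) "=" 1).getD []
    if halves.length == 2 && (PySem.Str.upper ((PySem.List.pyGet? halves 0).getD "") == "SHA256") then
      some ((PySem.List.pyGet? halves 1).getD "")
    else rawScan rest

theorem rawScan_cons (p : String) (rest : List String) :
    rawScan (p :: rest) =
      (if (((PySem.Str.splitMax? (PySem.Str.strip p) "=" 1).getD []).length == 2 &&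
          (PySem.Str.upper ((PySem.List.pyGet? ((PySem.Str.splitMax? (PySem.Str.strip p) "=" 1).getD []) 0).getD "") == "SHA256")) = true then
        some ((PySem.List.pyGet? ((PySem.Str.splitMax? (PySem.Str.strip p) "=" 1).getD []) 1).getD "")
      else rawScan rest) := rfl

theorem foldl_bStep (parts : List String) : ∀ (tbl : PySem.Dict String String),
    ((parts.foldl bStep tbl).get? "SHA256") =
      match tbl.get? "SHA256" with
      | some v => some v
      | none => rawScan parts := by
  induction parts with
  | nil =>
    intro tbl
    cases h : tbl.get? "SHA256" <;> simp [rawScan, h]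
  | cons p rest ih =>
    intro tbl
    rw [List.foldl_cons, ih]
    show _ = match tbl.get? "SHA256" with
      | some v => some v
      | none => rawScan (p :: rest)
    unfold bStep
    rw [rawScan_cons]
    by_cases hlen : ((PySem.Str.splitMax? (PySem.Str.strip p) "=" 1).getD []).length == 2
    · rw [if_pos hlen]
      simp only [hlen, Bool.true_and]
      set key := PySem.Str.upper
        ((PySem.List.pyGet? ((PySem.Str.splitMax? (PySem.Str.strip p) "=" 1).getD []) 0).getD "") with hkey
      set v1 := (PySem.List.pyGet? ((PySem.Str.splitMax? (PySem.Str.strip p) "=" 1).getD []) 1).getD "" with hv1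
      by_cases hk : key = "SHA256"
      · rw [hk]
        simp only [beq_self_eq_true, if_true]
        by_cases hc : tbl.contains "SHA256"
        · rw [if_pos hc]
          rw [PySem.Dict.contains_eq_isSome_get?] at hc
          cases h : tbl.get? "SHA256" with
          | none => rw [h] at hc; simp at hc
          | some v => rfl
        · rw [if_neg hc]
          have hn : tbl.get? "SHA256" = none := by
            rw [PySem.Dict.contains_eq_isSome_get?] at hc
            cases h : tbl.get? "SHA256" with
            | none => rfl
            | some v => rw [h] at hc; simp at hc
          rw [PySem.Dict.get?_insert, if_pos rfl, hn]
      · have hbk : (key == "SHA256") = false := by simp [hk]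
        rw [hbk]
        simp only [Bool.false_eq_true, if_false]
        by_cases hc : tbl.contains key
        · rw [if_pos hc]
        · rw [if_neg hc]
          rw [PySem.Dict.get?_insert, if_neg (fun h => hk h.symm)]
    · rw [if_neg (by simpa using hlen)]
      simp only [hlen, Bool.false_and, Bool.false_eq_true, if_false]

theorem aScan_cons (p : String) (rest : List String) :
    aScan (p :: rest) =
      (if PySem.Str.startswith (PySem.Str.upper (PySem.Str.strip p)) "SHA256=" then
        some (PySem.Str.lower (PySem.Str.strip ((PySem.List.pyGet? ((PySem.Str.splitMax? (PySem.Str.strip p) "=" 1).getD []) 1).getD "")))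
      else aScan rest) := rfl

theorem aScan_eq_rawScan (parts : List String) :
    aScan parts = (rawScan parts).map (fun v => PySem.Str.lower (PySem.Str.strip v)) := by
  induction parts with
  | nil => rfl
  | cons p rest ih =>
    rw [aScan_cons, rawScan_cons, cond_eq (PySem.Str.strip p)]
    by_cases h : (((PySem.Str.splitMax? (PySem.Str.strip p) "=" 1).getD []).length == 2 &&
        (PySem.Str.upper ((PySem.List.pyGet? ((PySem.Str.splitMax? (PySem.Str.strip p) "=" 1).getD []) 0).getD "") == "SHA256")) = true
    · rw [h]
      rfl
    · rw [Bool.not_eq_true] at h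
      rw [h]
      rw [if_neg (by simp), if_neg (by simp), ih]

theorem fallback_eq (m : List (String × String)) : aFallback m = bFallback m := by
  unfold aFallback bFallback
  cases hg : pvGet m "Hashes" with
  | none => simp [PySem.Dict.get?_empty]
  | some h =>
    simp only
    rw [foldl_bStep]
    rw [PySem.Dict.get?_empty]
    rw [aScan_eq_rawScan]
    cases rawScan ((PySem.Str.split? h ",").getD []) <;> rfl

-- ===== VERDICT (by name: the statement is the Claim_ definition above) =====
theorem parse_sha256_spec : Claim_equal_parse_sha256 := by
  intro m _
  unfold Spec_parse_sha256 parse_sha256 parse_sha256_alt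
  rw [fallback_eq]
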